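-- pv_equiv track=rewrite | github.com/1593726048/Advent-Of-Code-2021 | src/Year2023/Day12/Question1.py | check
-- ===== SOURCE A (Python) =====
-- def check(springs, nums):
--     if None in springs:
--         return False
--     total_results = []
--     cur_res = 0
--     for i in springs:
--         if i:
--             cur_res += 1
--         elif cur_res != 0:
--             total_results.append(cur_res)
--             cur_res = 0
--     if cur_res !=0:
--         total_results.append(cur_res)
--     if total_results == nums:
--         return True
--     return False
-- ===== SOURCE B (Python) =====
-- def check(springs, nums):
--     if None in springs:
--         return False
--     s = ''.join('#' if x else '.' for x in springs)
--     return [len(p) for p in s.split('.') if p] == nums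
-- ===== Notes on version B (the rewrite author's own statement) =====
-- stated objective: alternative
-- what changed: B re-represents springs as a '#'/'.' string, splits it on '.', and compares the lengths of the nonempty pieces to nums, replacing A's single-pass counter/flush accumulator loop by staged split-based passes.
import Mathlib
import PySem

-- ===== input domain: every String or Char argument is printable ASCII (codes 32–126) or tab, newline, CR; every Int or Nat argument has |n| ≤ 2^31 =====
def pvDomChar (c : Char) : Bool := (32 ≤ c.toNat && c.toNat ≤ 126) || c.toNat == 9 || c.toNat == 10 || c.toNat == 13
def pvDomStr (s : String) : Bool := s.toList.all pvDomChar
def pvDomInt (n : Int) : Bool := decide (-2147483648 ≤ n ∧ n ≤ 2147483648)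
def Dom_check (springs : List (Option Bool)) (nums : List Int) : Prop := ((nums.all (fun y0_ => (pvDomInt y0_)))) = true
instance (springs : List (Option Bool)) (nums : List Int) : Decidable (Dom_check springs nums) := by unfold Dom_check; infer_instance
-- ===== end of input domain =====

-- B re-represents springs as a '#'/'.' char string, splits it on '.', and compares lengths of nonempty pieces to nums; alternative representation, same cost.


-- ===== PORT A =====
-- `if i:` — element truthiness: only `some true` is truthy (None and False are falsy)
def check (springs : List (Option Bool)) (nums : List Int) : Bool :=
  if springs.contains none then false
  else
    let st := springs.foldl (fun (st : List Int × Int) i =>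
      if i == some true then (st.1, st.2 + 1)
      else if st.2 ≠ 0 then (st.1 ++ [st.2], (0 : Int))
      else st) ([], 0)
    let total := if st.2 ≠ 0 then st.1 ++ [st.2] else st.1
    if total == nums then true else false

-- ===== PORT B =====
-- Source B: s = ''.join('#' if x else '.' for x in springs); s.split('.') ported as List.splitOn '.'
-- on the char list (exact: Python str.split with a one-char separator is List.splitOn on the chars)
def check_alt (springs : List (Option Bool)) (nums : List Int) : Bool :=
  if springs.contains none then false
  else
    let s := springs.map (fun x => if x == some true then '#' else '.')
    ((s.splitOn '.').filter (fun p => !p.isEmpty)).map (fun p => (p.length : Int)) == nums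

-- ===== PRECONDITION & SPEC =====
def Spec_check (springs : List (Option Bool)) (nums : List Int) (out : Bool) : Prop := out = check_alt springs nums
instance (springs : List (Option Bool)) (nums : List Int) (out : Bool) : Decidable (Spec_check springs nums out) := by unfold Spec_check; infer_instance

-- ===== CLAIM (what is proved, stated in full; the proofs are below) =====
def Claim_equal_check : Prop := ∀ (springs : List (Option Bool)) (nums : List Int), Dom_check springs nums → Spec_check springs nums (check springs nums)

-- ===== LEMMAS AND PROOFS =====

-- spec-level run-length function on list suffixes
def runsOf : List (Option Bool) → List Int
  | [] => []
  | x :: xs =>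
    if x == some true then
      ((1 + (xs.takeWhile (· == some true)).length : Nat) : Int) :: runsOf (xs.dropWhile (· == some true))
    else runsOf xs
termination_by l => l.length
decreasing_by
  · have := List.length_dropWhile_le (· == some true) xs; simp; omega
  · simp

-- A's loop: starting from (acc, cur) with 0 ≤ cur, the flushed result is acc
-- plus (cur merged into the leading run, if pending) plus the remaining runs.
theorem foldA_eq (xs : List (Option Bool)) (acc : List Int) (cur : Int) (hc : 0 ≤ cur) :
    (let st := xs.foldl (fun (st : List Int × Int) i =>
        if i == some true then (st.1, st.2 + 1)
        else if st.2 ≠ 0 then (st.1 ++ [st.2], (0 : Int))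
        else st) (acc, cur)
     if st.2 ≠ 0 then st.1 ++ [st.2] else st.1) =
    acc ++ (if cur = 0 then runsOf xs
            else (cur + ((xs.takeWhile (· == some true)).length : Int)) :: runsOf (xs.dropWhile (· == some true))) := by
  induction xs generalizing acc cur with
  | nil =>
    by_cases h : cur = 0 <;> simp [List.foldl, h, runsOf]
  | cons x xs ih =>
    by_cases htr : x == some true
    · simp only [List.foldl, htr, if_pos]
      rw [ih acc (cur + 1) (by omega)]
      have hne : cur + 1 ≠ 0 := by omega
      by_cases h : cur = 0
      · simp [h, hne, runsOf, htr]
      · simp only [h, hne, if_neg, List.takeWhile_cons, htr, if_pos, List.dropWhile_cons,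
          List.length_cons]
        simp
        push_cast; ring
    · simp only [List.foldl, htr, if_neg, Bool.false_eq_true, not_false_iff, if_pos]
      by_cases h : cur = 0
      · simp only [h, ne_eq, not_true_eq_false, if_neg, ite_false, not_false_iff]
        rw [ih acc 0 (by omega)]
        simp [runsOf, htr, List.takeWhile_cons, List.dropWhile_cons]
      · simp only [h, if_pos, ne_eq, not_false_iff, if_neg]
        rw [ih (acc ++ [cur]) 0 (by omega)]
        simp [runsOf, htr, List.takeWhile_cons, List.dropWhile_cons, h]

theorem dropWhile_head_false {α : Type} (p : α → Bool) (l : List α) (y : α) (r : List α)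
    (h : l.dropWhile p = y :: r) : p y = false := by
  induction l with
  | nil => simp at h
  | cons a l ih =>
    rw [List.dropWhile_cons] at h
    by_cases hp : p a
    · rw [if_pos hp] at h; exact ih h
    · rw [if_neg hp] at h
      cases h
      simpa using hp

-- B's staged passes: nonempty-piece lengths of the split '#'/'.' rendering are exactly the runs.
theorem splitB_eq_aux (n : Nat) :
    ∀ xs : List (Option Bool), xs.length ≤ n →
    (((xs.map (fun x => if x == some true then '#' else '.')).splitOn '.').filter
        (fun p => !p.isEmpty)).map (fun p => (p.length : Int)) = runsOf xs := by
  induction n with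
  | zero =>
    intro xs h
    have : xs = [] := List.eq_nil_of_length_eq_zero (by omega)
    subst this
    simp [List.splitOn, List.splitOnP_nil, runsOf]
  | succ n ih =>
    intro xs hlen
    match xs with
    | [] => simp [List.splitOn, List.splitOnP_nil, runsOf]
    | x :: xs' =>
      by_cases htr : x == some true
      · -- leading '#' run
        have hx : (if x == some true then '#' else '.') = '#' := by simp [htr]
        set run := xs'.takeWhile (· == some true) with hrun
        set rest := xs'.dropWhile (· == some true) with hrest
        have hsplit : xs' = run ++ rest := (List.takeWhile_append_dropWhile).symm
        have hrunall : ∀ c ∈ ('#' :: run.map (fun x => if x == some true then '#' else '.')),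
            ¬ (c == '.') = true := by
          intro c hc
          rcases List.mem_cons.mp hc with h | h
          · subst h; decide
          · rcases List.mem_map.mp h with ⟨y, hy, hyc⟩
            have hyt : (y == some true) = true :=
              List.mem_takeWhile_imp (p := fun x => x == some true) (hrun ▸ hy)
            simp [hyt] at hyc
            subst hyc; decide
        match hr : rest with
        | [] =>
          -- all of xs' is the run
          have hxs' : xs' = run := by rw [hsplit]; simp
          have hxv : x = some true := by simpa using htr
          have hmap : (x :: xs').map (fun x => if x == some true then '#' else '.') =
              '#' :: run.map (fun x => if x == some true then '#' else '.') := by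
            simp [hxv, hxs']
          rw [hmap, List.splitOn, List.splitOnP_eq_single _ _ hrunall]
          rw [runsOf]
          simp only [htr, if_pos, ← hrest, ← hrun, hr]
          simp [runsOf]
          omega
        | y :: rest' =>
          have hy : ¬ (y == some true) = true := by
            have := dropWhile_head_false (fun x => x == some true) xs' y rest' hrest.symm
            simpa using this
          have hy' : ¬ y = some true := by simpa using hy
          have hyc : (if y == some true then '#' else '.') = '.' := by simp [hy]
          have hmap : (x :: xs').map (fun x => if x == some true then '#' else '.') =
              ('#' :: run.map (fun x => if x == some true then '#' else '.')) ++
              '.' :: rest'.map (fun x => if x == some true then '#' else '.') := by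
            simp only [List.map_cons, hx]
            rw [hsplit]
            simp [hyc, hy']
          rw [hmap, List.splitOn, List.splitOnP_first _ _ hrunall '.' (by decide)]
          have hlen' : rest'.length ≤ n := by
            have h1 : (List.dropWhile (fun x => x == some true) xs').length ≤ xs'.length :=
              List.length_dropWhile_le _ _
            rw [← hrest] at h1
            simp at h1 hlen
            omega
          have hIH := ih rest' hlen'
          rw [List.splitOn] at hIH
          simp only [List.filter_cons, List.map_cons]
          rw [runsOf]
          simp only [htr, if_pos, ← hrun, ← hrest, hr]
          rw [runsOf]
          simp only [hy, Bool.false_eq_true, if_neg, if_false]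
          simp
          exact ⟨by omega, by simpa using hIH⟩
      · -- leading separator: empty first piece, dropped by the filter
        have hx : (if x == some true then '#' else '.') = '.' := by simp [htr]
        have hlen' : xs'.length ≤ n := by simp at hlen; omega
        have hIH := ih xs' hlen'
        rw [List.splitOn] at hIH ⊢
        simp only [List.map_cons, hx, List.splitOnP_cons]
        simp only [show (('.' == '.') = true) from rfl, if_pos]
        rw [runsOf]
        simp only [htr, Bool.false_eq_true, if_neg, if_false]
        simpa using hIH

theorem splitB_eq (xs : List (Option Bool)) :
    (((xs.map (fun x => if x == some true then '#' else '.')).splitOn '.').filter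
        (fun p => !p.isEmpty)).map (fun p => (p.length : Int)) = runsOf xs :=
  splitB_eq_aux xs.length xs le_rfl

-- ===== VERDICT (by name: the statement is the Claim_ definition above) =====
theorem check_spec : Claim_equal_check := by
  intro springs nums _
  unfold Spec_check check check_alt
  by_cases hn : springs.contains none = true
  · rw [if_pos hn, if_pos hn]
  · rw [if_neg hn, if_neg hn]
    have hA := foldA_eq springs [] 0 le_rfl
    simp only [if_pos, List.nil_append] at hA
    dsimp only
    rw [hA, splitB_eq]
    cases hb : (runsOf springs == nums) <;> simp [hb]
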